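-- pv_equiv track=rewrite | github.com/mmahnken/advent-of-code-2020 | day-10/advent.py | organize_new_neighbors
-- ===== SOURCE A (Python) =====
-- def organize_new_neighbors(nn):
-- 	valid_mutuals = {}
--
-- 	for pair in nn:
-- 		valid_mutuals[tuple(pair)] = set()
-- 		for pair2 in nn:
-- 			if pair == pair2:
-- 				continue
--
-- 			if pair2[0] == pair[0]:
-- 				continue
--
--
-- 			if pair2[0] > pair[0] and pair2[0] < pair[1]:
-- 				continue
--
-- 			valid_mutuals[tuple(pair)].add(pair2)
--
-- 	return valid_mutuals
--
--
--
-- 	return overlaps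
-- ===== SOURCE B (Python) =====
-- def organize_new_neighbors(nn):
-- 	# Group the distinct pairs by first coordinate, then for each pair take the
-- 	# complement (set difference) of the union of the groups whose coordinate is
-- 	# blocked (equal to p[0], or strictly inside [p[0], p[1])).
-- 	distinct = list(dict.fromkeys(nn))
-- 	groups = {}
-- 	for q in distinct:
-- 		groups.setdefault(q[0], set()).add(q)
-- 	all_pairs = set(distinct)
-- 	valid_mutuals = {}
-- 	for p in distinct:
-- 		excluded = set()
-- 		for c in groups:
-- 			if c == p[0] or (p[0] < c < p[1]):
-- 				excluded |= groups[c]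
-- 		valid_mutuals[p] = all_pairs - excluded
-- 	return valid_mutuals
-- ===== Notes on version B (the rewrite author's own statement) =====
-- stated objective: alternative
-- what changed: B replaces A's per-pair rescan of nn with a precomputed index: it deduplicates nn once, groups the distinct pairs by first coordinate into a dict, and for each pair forms the union of the blocked coordinate groups and takes a set difference from the set of all pairs, instead of A's nested loop with a continue-chain adding elements one by one.
import Mathlib
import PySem

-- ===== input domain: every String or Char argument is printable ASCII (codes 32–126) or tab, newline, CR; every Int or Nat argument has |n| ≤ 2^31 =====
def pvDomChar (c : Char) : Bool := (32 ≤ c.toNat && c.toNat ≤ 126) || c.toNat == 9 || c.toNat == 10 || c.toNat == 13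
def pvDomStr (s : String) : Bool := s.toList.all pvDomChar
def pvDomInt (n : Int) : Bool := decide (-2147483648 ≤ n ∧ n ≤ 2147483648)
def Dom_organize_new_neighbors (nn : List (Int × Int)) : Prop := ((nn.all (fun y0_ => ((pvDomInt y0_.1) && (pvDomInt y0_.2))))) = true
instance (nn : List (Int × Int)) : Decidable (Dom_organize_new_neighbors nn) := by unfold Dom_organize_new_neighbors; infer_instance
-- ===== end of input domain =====

-- B groups the distinct pairs by first coordinate once and computes each pair's set by a
-- union of the blocked groups and a set difference, instead of A's nested rescan of nn.

-- ===== PORT A =====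
-- literal transliteration of A: dict built over nn, inner loop over nn with the
-- continue-chain building a set incrementally; items flattened to the required tuple shape
def organize_new_neighbors (nn : List (Int × Int)) : List (Int × Int × List (Int × Int)) :=
  let d : PySem.Dict (Int × Int) (PySem.Set (Int × Int)) :=
    nn.foldl (fun d pair =>
      d.insert pair
        (nn.foldl (fun s pair2 =>
          if pair == pair2 then s
          else if pair2.1 == pair.1 then s
          else if pair2.1 > pair.1 && pair2.1 < pair.2 then s
          else s.add pair2) PySem.Set.empty)) PySem.Dict.empty
  d.items.map (fun kv => (kv.1.1, kv.1.2, kv.2))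

-- ===== PORT B =====
-- literal transliteration of Source B: distinct = list(dict.fromkeys(nn)); groups =
-- setdefault/add loop (= Dict.modify with default empty set); then the loop over distinct
-- building valid_mutuals[p] = all_pairs - union of blocked groups (keys of the output dict
-- are the distinct pairs in order, so its items are exactly this map)
def organize_new_neighbors_alt (nn : List (Int × Int)) : List (Int × Int × List (Int × Int)) :=
  let distinct := PySem.List.dedup nn
  let groups : PySem.Dict Int (PySem.Set (Int × Int)) :=
    distinct.foldl (fun g q => g.modify q.1 PySem.Set.empty (fun s => PySem.Set.add s q)) PySem.Dict.empty
  let allPairs : PySem.Set (Int × Int) := PySem.Set.ofList distinct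
  distinct.map (fun p =>
    let excluded : PySem.Set (Int × Int) :=
      groups.keys.foldl (fun ex c =>
        if c == p.1 || (p.1 < c && c < p.2) then PySem.Set.union ex (groups.getD c PySem.Set.empty) else ex)
        PySem.Set.empty
    (p.1, p.2, PySem.Set.diff allPairs excluded))

-- ===== PRECONDITION & SPEC =====
def Spec_organize_new_neighbors (nn : List (Int × Int)) (out : List (Int × Int × List (Int × Int))) : Prop := out = organize_new_neighbors_alt nn
instance (nn : List (Int × Int)) (out : List (Int × Int × List (Int × Int))) : Decidable (Spec_organize_new_neighbors nn out) := by unfold Spec_organize_new_neighbors; infer_instance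

-- ===== CLAIM (what is proved, stated in full; the proofs are below) =====
def Claim_equal_organize_new_neighbors : Prop := ∀ (nn : List (Int × Int)), Dom_organize_new_neighbors nn → Spec_organize_new_neighbors nn (organize_new_neighbors nn)

-- ===== LEMMAS AND PROOFS =====

-- the predicate A's inner continue-chain implements ("pair2 survives the chain")
def pvC (p q : Int × Int) : Bool := q.1 < p.1 || (q.1 ≥ p.2 && !(q.1 == p.1))

-- A's continue-chain step equals a single conditional add with predicate pvC
theorem pv_step_eq (p q : Int × Int) (s : PySem.Set (Int × Int)) :
    (if p == q then s
     else if q.1 == p.1 then s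
     else if q.1 > p.1 && q.1 < p.2 then s
     else s.add q) = (if pvC p q then s.add q else s) := by
  by_cases h1 : p = q
  · subst h1; simp [pvC]
  · by_cases h2 : q.1 = p.1
    · simp [pvC, h1, h2]
    · by_cases h3 : q.1 < p.1
      · simp only [pvC]; split_ifs <;> simp_all <;> omega
      · simp only [pvC]; split_ifs <;> simp_all <;> omega

-- inserting a key with the value the key-map already gives it
theorem pv_insert_map (f : (Int × Int) → PySem.Set (Int × Int)) (s : List (Int × Int)) (p : Int × Int) :
    (PySem.Dict.mk (s.map (fun k => (k, f k)))).insert p (f p)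
      = PySem.Dict.mk ((PySem.Set.add s p).map (fun k => (k, f k))) := by
  have hkeys : (PySem.Dict.mk (s.map (fun k => (k, f k)))).keys = s := by
    simp [PySem.Dict.keys, Function.comp_def]
  by_cases hp : p ∈ s
  · have hc : (PySem.Dict.mk (s.map (fun k => (k, f k)))).contains p = true := by
      rw [PySem.Dict.contains_eq_decide_mem_keys, hkeys]; simpa using hp
    have ha : PySem.Set.add s p = s := by
      simp [PySem.Set.add, PySem.Set.contains, hp]
    rw [ha]
    simp only [PySem.Dict.insert, hc, if_pos]
    congr 1
    rw [List.map_map]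
    apply List.map_congr_left
    intro a _
    by_cases hap : a = p
    · subst hap; simp
    · simp [hap]
  · have hc : (PySem.Dict.mk (s.map (fun k => (k, f k)))).contains p = false := by
      rw [PySem.Dict.contains_eq_decide_mem_keys, hkeys]; simpa using hp
    have ha : PySem.Set.add s p = s ++ [p] := by
      simp [PySem.Set.add, PySem.Set.contains, hp]
    rw [ha]
    simp only [PySem.Dict.insert, hc]
    simp

-- the dict A folds up, as items: a map over an accumulated key set
theorem pv_foldl_insert (f : (Int × Int) → PySem.Set (Int × Int)) (nn : List (Int × Int)) :
    ∀ s : List (Int × Int),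
      (nn.foldl (fun d p => d.insert p (f p)) (PySem.Dict.mk (s.map (fun k => (k, f k)))))
        = PySem.Dict.mk ((PySem.Set.update s nn).map (fun k => (k, f k))) := by
  induction nn with
  | nil => intro s; rfl
  | cons x xs ih =>
      intro s
      rw [List.foldl_cons, pv_insert_map, ih]
      rfl

-- ofList commutes with filter (keep-first dedup of a filtered list)
theorem pv_ofList_filter (c : Int × Int → Bool) (xs : List (Int × Int)) :
    PySem.Set.ofList (xs.filter c) = (PySem.Set.ofList xs).filter c := by
  induction xs with
  | nil => rfl
  | cons x xs ih =>
      by_cases h : c x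
      · rw [List.filter_cons_of_pos h, PySem.Set.ofList_cons, PySem.Set.ofList_cons]
        simp only [PySem.Set.discard, List.filter_cons_of_pos h, List.filter_filter, ih,
          List.filter_filter]
        congr 1
        apply List.filter_congr
        intro a _
        rw [Bool.and_comm]
      · rw [List.filter_cons_of_neg (by simp [h]), PySem.Set.ofList_cons, ih,
          List.filter_cons_of_neg (by simp [h])]
        simp only [PySem.Set.discard, List.filter_filter]
        symm
        apply List.filter_congr
        intro a ha
        by_cases hax : a = x
        · subst hax; simp [h]
        · simp [hax]

-- characterization of B's groups dict: the group stored at c collects the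
-- pairs with first coordinate c, in traversal order
theorem pv_groups_getD (l : List (Int × Int)) :
    ∀ (d : PySem.Dict Int (PySem.Set (Int × Int))) (c : Int),
      ((l.foldl (fun g q => g.modify q.1 PySem.Set.empty (fun s => PySem.Set.add s q)) d).getD c PySem.Set.empty)
        = PySem.Set.update (d.getD c PySem.Set.empty) (l.filter (fun q => q.1 == c)) := by
  induction l with
  | nil => intro d c; simp [PySem.Set.update]
  | cons x xs ih =>
      intro d c
      rw [List.foldl_cons, ih]
      by_cases hc : x.1 = c
      · rw [List.filter_cons_of_pos (by simp [hc])]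
        rw [PySem.Set.update_cons]
        congr 1
        rw [PySem.Dict.getD_modify]
        simp [hc]
      · rw [List.filter_cons_of_neg (by simp [hc])]
        congr 1
        rw [PySem.Dict.getD_modify]
        simp [Ne.symm hc]

-- membership in the union-of-selected-groups fold
theorem pv_mem_union_fold (cond : Int → Bool) (g : Int → PySem.Set (Int × Int))
    (keys : List Int) (y : Int × Int) :
    ∀ ex0 : PySem.Set (Int × Int),
      (y ∈ keys.foldl (fun ex c => if cond c then PySem.Set.union ex (g c) else ex) ex0)
        ↔ y ∈ ex0 ∨ ∃ c ∈ keys, cond c ∧ y ∈ g c := by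
  induction keys with
  | nil => intro ex0; simp
  | cons k ks ih =>
      intro ex0
      rw [List.foldl_cons]
      by_cases hk : cond k
      · rw [if_pos hk, ih, PySem.Set.mem_union]
        constructor
        · rintro ((h | h) | ⟨c, hc, h1, h2⟩)
          · exact Or.inl h
          · exact Or.inr ⟨k, by simp, hk, h⟩
          · exact Or.inr ⟨c, by simp [hc], h1, h2⟩
        · rintro (h | ⟨c, hc, h1, h2⟩)
          · exact Or.inl (Or.inl h)
          · rcases List.mem_cons.mp hc with rfl | hc
            · exact Or.inl (Or.inr h2)
            · exact Or.inr ⟨c, hc, h1, h2⟩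
      · rw [if_neg hk, ih]
        constructor
        · rintro (h | ⟨c, hc, h1, h2⟩)
          · exact Or.inl h
          · exact Or.inr ⟨c, by simp [hc], h1, h2⟩
        · rintro (h | ⟨c, hc, h1, h2⟩)
          · exact Or.inl h
          · rcases List.mem_cons.mp hc with rfl | hc
            · exact absurd h1 (by simp [hk])
            · exact Or.inr ⟨c, hc, h1, h2⟩

-- the blocked-coordinate test is the negation of pvC (on the pair's own coordinate)
theorem pv_cond_neg (p q : Int × Int) :
    (q.1 == p.1 || (p.1 < q.1 && q.1 < p.2)) = !pvC p q := by
  rw [Bool.eq_iff_iff]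
  simp [pvC]
  omega

-- B's per-pair set is the filter of the distinct pairs by pvC
theorem pv_alt_set (nn : List (Int × Int)) (p : Int × Int) :
    PySem.Set.diff (PySem.Set.ofList (PySem.List.dedup nn))
      ((((PySem.List.dedup nn).foldl
            (fun g q => g.modify q.1 PySem.Set.empty (fun s => PySem.Set.add s q))
            PySem.Dict.empty).keys).foldl
        (fun ex c =>
          if c == p.1 || (p.1 < c && c < p.2) then
            PySem.Set.union ex
              (((PySem.List.dedup nn).foldl
                  (fun g q => g.modify q.1 PySem.Set.empty (fun s => PySem.Set.add s q))
                  PySem.Dict.empty).getD c PySem.Set.empty)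
          else ex)
        PySem.Set.empty)
      = (PySem.List.dedup nn).filter (pvC p) := by
  set distinct := PySem.List.dedup nn with hdist
  set groups : PySem.Dict Int (PySem.Set (Int × Int)) :=
    distinct.foldl (fun g q => g.modify q.1 PySem.Set.empty (fun s => PySem.Set.add s q)) PySem.Dict.empty with hg
  have hnd : distinct.Nodup := PySem.List.nodup_dedup nn
  have hself : PySem.Set.ofList distinct = distinct := PySem.Set.ofList_eq_self_of_nodup _ hnd
  have hkeys : groups.keys = PySem.Set.ofList (distinct.map Prod.fst) := by
    rw [hg, PySem.Dict.keys_foldl_modify_key distinct Prod.fst PySem.Set.empty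
      (fun _ q => fun s => PySem.Set.add s q) PySem.Dict.empty]
    simp [PySem.Dict.keys_empty, PySem.Set.update_nil_left]
  have hgrp : ∀ c, groups.getD c PySem.Set.empty
      = PySem.Set.ofList (distinct.filter (fun q => q.1 == c)) := by
    intro c
    rw [hg, pv_groups_getD]
    simp [PySem.Dict.getD_empty, PySem.Set.update_nil_left]
  have hmem : ∀ y ∈ distinct,
      (y ∈ groups.keys.foldl (fun ex c =>
         if c == p.1 || (p.1 < c && c < p.2) then PySem.Set.union ex (groups.getD c PySem.Set.empty) else ex)
         PySem.Set.empty)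
        ↔ (pvC p y = false) := by
    intro y hy
    rw [pv_mem_union_fold]
    constructor
    · rintro (h | ⟨c, _, h1, h2⟩)
      · simp [PySem.Set.empty] at h
      · rw [hgrp c, PySem.Set.mem_ofList, List.mem_filter] at h2
        have hc : y.1 = c := by simpa using h2.2
        subst hc
        rw [pv_cond_neg p y] at h1
        simpa using h1
    · intro h
      refine Or.inr ⟨y.1, ?_, ?_, ?_⟩
      · rw [hkeys, PySem.Set.mem_ofList]
        exact List.mem_map.mpr ⟨y, hy, rfl⟩
      · rw [pv_cond_neg p y]; simp [h]
      · rw [hgrp y.1, PySem.Set.mem_ofList, List.mem_filter]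
        exact ⟨hy, by simp⟩
  rw [PySem.Set.diff, hself]
  apply List.filter_congr
  intro y hy
  rcases Bool.eq_false_or_eq_true (pvC p y) with hb | hb <;> rw [hb]
  · have hout : ¬ (y ∈ groups.keys.foldl (fun ex c =>
        if c == p.1 || (p.1 < c && c < p.2) then PySem.Set.union ex (groups.getD c PySem.Set.empty) else ex)
        PySem.Set.empty) := fun h => by
      have hfalse := (hmem y hy).mp h
      rw [hb] at hfalse
      exact Bool.true_eq_false.mp hfalse
    have hcf : PySem.Set.contains (groups.keys.foldl (fun ex c =>
        if c == p.1 || (p.1 < c && c < p.2) then PySem.Set.union ex (groups.getD c PySem.Set.empty) else ex)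
        PySem.Set.empty) y = false := by
      rw [← Bool.not_eq_true, PySem.Set.contains_iff]
      exact hout
    rw [hcf]
    rfl
  · have hin := (hmem y hy).mpr hb
    rw [(PySem.Set.contains_iff _ y).mpr hin]
    rfl

-- ===== VERDICT (by name: the statement is the Claim_ definition above) =====
theorem organize_new_neighbors_spec : Claim_equal_organize_new_neighbors := by
  intro nn _
  unfold Spec_organize_new_neighbors organize_new_neighbors organize_new_neighbors_alt
  -- A's inner loop computes ofList (nn.filter (pvC pair))
  have hstep : ∀ (pair : Int × Int),
      (nn.foldl (fun s pair2 =>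
          if pair == pair2 then s
          else if pair2.1 == pair.1 then s
          else if pair2.1 > pair.1 && pair2.1 < pair.2 then s
          else s.add pair2) PySem.Set.empty)
        = PySem.Set.ofList (nn.filter (pvC pair)) := by
    intro pair
    have h1 : nn.foldl (fun s pair2 =>
          if pair == pair2 then s
          else if pair2.1 == pair.1 then s
          else if pair2.1 > pair.1 && pair2.1 < pair.2 then s
          else s.add pair2) PySem.Set.empty
        = nn.foldl (fun s q => if pvC pair q then PySem.Set.add s q else s) PySem.Set.empty := by
      apply PySem.List.foldl_congr_mem
      intro s q _
      exact pv_step_eq pair q s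
    rw [h1, PySem.List.foldl_if_eq_foldl_filter]
    rfl
  have h2 : (nn.foldl (fun d pair =>
        d.insert pair (nn.foldl (fun s pair2 =>
          if pair == pair2 then s
          else if pair2.1 == pair.1 then s
          else if pair2.1 > pair.1 && pair2.1 < pair.2 then s
          else s.add pair2) PySem.Set.empty)) PySem.Dict.empty)
      = nn.foldl (fun d p => d.insert p (PySem.Set.ofList (nn.filter (pvC p)))) PySem.Dict.empty := by
    apply PySem.List.foldl_congr_mem
    intro d p _
    rw [hstep p]
  simp only [h2]
  have h3 := pv_foldl_insert (fun p => PySem.Set.ofList (nn.filter (pvC p))) nn []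
  have hempty : (PySem.Dict.empty : PySem.Dict (Int × Int) (PySem.Set (Int × Int)))
      = PySem.Dict.mk (([] : List (Int × Int)).map (fun k => (k, PySem.Set.ofList (nn.filter (pvC k))))) := rfl
  rw [hempty, h3]
  have hupd : PySem.Set.update ([] : List (Int × Int)) nn = PySem.List.dedup nn := rfl
  rw [hupd]
  simp only [List.map_map]
  apply List.map_congr_left
  intro p _
  have hval : PySem.Set.ofList (nn.filter (pvC p))
      = (PySem.List.dedup nn).filter (pvC p) := by
    rw [pv_ofList_filter]
    simp [PySem.List.dedup_eq_ofList]
  rw [pv_alt_set nn p, ← hval]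
  rfl
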